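-- pv_equiv track=rewrite | github.com/lc-empty/ES-281 | L-03/exercises-i.py | imprimir_conjunto_numeros_primos
-- ===== SOURCE A (Python) =====
-- def imprimir_conjunto_numeros_primos(conjunto_numeros):
--     conjunto_numeros_primos =set()
--     for numero in conjunto_numeros:
--         divisores = 0
--         for i in range(1,numero+1):
--             if numero % i == 0:
--                 divisores = divisores + 1
--         if divisores == 2:
--             conjunto_numeros_primos.add(numero)
--     return sorted(conjunto_numeros_primos)
-- ===== SOURCE B (Python) =====
-- def imprimir_conjunto_numeros_primos(conjunto_numeros):
--     def es_primo(n):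
--         if n < 2:
--             return False
--         i = 2
--         while i * i <= n:
--             if n % i == 0:
--                 return False
--             i += 1
--         return True
--     return sorted({n for n in conjunto_numeros if es_primo(n)})
-- ===== Notes on version B (the rewrite author's own statement) =====
-- stated objective: faster
-- what changed: A counts all divisors of each number with a full scan from 1 to n and keeps those with exactly 2 divisors; B tests primality by trial division up to sqrt(n) with early exit and filters in one comprehension.
import Mathlib
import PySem

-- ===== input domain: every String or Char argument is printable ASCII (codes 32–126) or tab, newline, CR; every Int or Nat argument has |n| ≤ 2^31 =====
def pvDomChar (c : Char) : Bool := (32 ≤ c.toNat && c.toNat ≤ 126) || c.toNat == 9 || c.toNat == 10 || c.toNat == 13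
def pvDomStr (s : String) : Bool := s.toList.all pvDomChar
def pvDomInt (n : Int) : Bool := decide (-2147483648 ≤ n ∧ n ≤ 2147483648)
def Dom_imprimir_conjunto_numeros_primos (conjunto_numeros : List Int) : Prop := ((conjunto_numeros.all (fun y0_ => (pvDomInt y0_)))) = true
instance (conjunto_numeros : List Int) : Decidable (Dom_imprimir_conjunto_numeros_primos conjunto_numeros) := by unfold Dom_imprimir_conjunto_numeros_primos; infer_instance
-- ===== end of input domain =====

-- B replaces A's exhaustive divisor count (scan of 1..n per number) by trial division
-- with early exit, stopping at i*i > n, and filters the numbers in one comprehension.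

-- ===== PORT A =====
-- divisor count of `numero`: A's inner `for i in range(1, numero+1)` loop
def pvDivCount (numero : Int) : Int :=
  (PySem.List.pyRange 1 (numero + 1) 1).foldl
    (fun divisores i => if PySem.Int.mod numero i = 0 then divisores + 1 else divisores) 0

def imprimir_conjunto_numeros_primos (conjunto_numeros : List Int) : List Int :=
  let conjunto_numeros_primos : PySem.Set Int :=
    conjunto_numeros.foldl
      (fun conjunto_numeros_primos numero =>
        if pvDivCount numero = 2 then PySem.Set.add conjunto_numeros_primos numero
        else conjunto_numeros_primos)
      PySem.Set.empty
  PySem.List.sorted conjunto_numeros_primos (fun x => x) false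

-- ===== PORT B =====
-- the `while i * i <= n` trial-division loop of Source B's es_primo
def pvTrial (n i : Int) : Bool :=
  if h : i * i ≤ n then
    if PySem.Int.mod n i = 0 then false else pvTrial n (i + 1)
  else true
termination_by (n + 1 - i).toNat
decreasing_by
  have hi : i ≤ n := by nlinarith [sq_nonneg i, sq_nonneg (i - 1)]
  omega

def pvEsPrimo (n : Int) : Bool :=
  if n < 2 then false else pvTrial n 2

def imprimir_conjunto_numeros_primos_alt (conjunto_numeros : List Int) : List Int :=
  PySem.List.sorted (PySem.Set.ofList (conjunto_numeros.filter pvEsPrimo)) (fun x => x) false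

-- ===== PRECONDITION & SPEC =====
def Spec_imprimir_conjunto_numeros_primos (conjunto_numeros : List Int) (out : List Int) : Prop := out = imprimir_conjunto_numeros_primos_alt conjunto_numeros
instance (conjunto_numeros : List Int) (out : List Int) : Decidable (Spec_imprimir_conjunto_numeros_primos conjunto_numeros out) := by unfold Spec_imprimir_conjunto_numeros_primos; infer_instance

-- ===== CLAIM (what is proved, stated in full; the proofs are below) =====
def Claim_equal_imprimir_conjunto_numeros_primos : Prop := ∀ (conjunto_numeros : List Int), Dom_imprimir_conjunto_numeros_primos conjunto_numeros → Spec_imprimir_conjunto_numeros_primos conjunto_numeros (imprimir_conjunto_numeros_primos conjunto_numeros)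

-- ===== LEMMAS AND PROOFS =====

-- A's inner loop is a countP
theorem pvFoldCount (l : List Int) (p : Int → Prop) [DecidablePred p] (a : Int) :
    l.foldl (fun d i => if p i then d + 1 else d) a = a + (l.countP (fun i => decide (p i)) : Int) := by
  induction l generalizing a with
  | nil => simp
  | cons x xs ih =>
    by_cases hx : p x <;> simp [hx, ih] <;> ring

-- the range-count as a Nat count
theorem pvDivCount_eq (n : Int) (hn : 1 ≤ n) :
    pvDivCount n = ((List.range n.toNat).countP (fun k => decide ((k + 1 : ℕ) ∣ n.toNat)) : Int) := by
  unfold pvDivCount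
  rw [pvFoldCount, PySem.List.pyRange_one]
  have h1 : (n + 1 - 1).toNat = n.toNat := by omega
  rw [h1, List.countP_map, zero_add]
  congr 1
  apply List.countP_congr
  intro k _
  simp only [Function.comp_apply, decide_eq_true_eq]
  rw [PySem.Int.mod_eq_zero_iff_dvd]
  have hn' : n = ((n.toNat : ℕ) : Int) := by omega
  have hk : (1 + (k : Int)) = (((k + 1 : ℕ) : Int)) := by push_cast; ring
  rw [hn', hk, Int.natCast_dvd_natCast, Int.toNat_natCast]

-- Finset form and the prime characterisation of "exactly two divisors"
theorem pvCount_eq_card (m : ℕ) (p : ℕ → Bool) :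
    (List.range m).countP p = ((Finset.range m).filter (fun k => p k = true)).card := by
  induction m with
  | zero => simp
  | succ m ih =>
    rw [List.range_succ, Finset.range_add_one, List.countP_append, ih, Finset.filter_insert]
    by_cases h : p m = true
    · simp [h, Finset.card_insert_of_notMem]
    · simp [h]

theorem pvCard_two_iff_prime (m : ℕ) (hm : 1 ≤ m) :
    ((Finset.range m).filter (fun k => (k + 1) ∣ m)).card = 2 ↔ m.Prime := by
  constructor
  · intro hc
    have hm2 : 2 ≤ m := by
      by_contra h
      have hm1 : m = 1 := by omega
      subst hm1
      have : ((Finset.range 1).filter (fun k => (k + 1) ∣ 1)).card = 1 := by decide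
      omega
    by_contra hnp
    obtain ⟨d, hdvd, hd2, hdm⟩ := Nat.exists_dvd_of_not_prime2 hm2 hnp
    have hsub : ({0, d - 1, m - 1} : Finset ℕ) ⊆
        (Finset.range m).filter (fun k => (k + 1) ∣ m) := by
      intro k hk
      simp only [Finset.mem_insert, Finset.mem_singleton] at hk
      simp only [Finset.mem_filter, Finset.mem_range]
      rcases hk with rfl | rfl | rfl
      · exact ⟨by omega, one_dvd m⟩
      · refine ⟨by omega, ?_⟩
        have : d - 1 + 1 = d := by omega
        rw [this]; exact hdvd
      · refine ⟨by omega, ?_⟩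
        have : m - 1 + 1 = m := by omega
        rw [this]
    have hcard : ({0, d - 1, m - 1} : Finset ℕ).card = 3 := by
      rw [Finset.card_insert_of_notMem (by simp; omega),
          Finset.card_insert_of_notMem (by simp; omega), Finset.card_singleton]
    have := Finset.card_le_card hsub
    omega
  · intro hp
    have hm2 : 2 ≤ m := hp.two_le
    have hF : (Finset.range m).filter (fun k => (k + 1) ∣ m) = {0, m - 1} := by
      ext k
      simp only [Finset.mem_filter, Finset.mem_range, Finset.mem_insert, Finset.mem_singleton]
      constructor
      · rintro ⟨hk, hdvd⟩
        rcases hp.eq_one_or_self_of_dvd (k + 1) hdvd with h | h <;> omega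
      · rintro (rfl | rfl)
        · exact ⟨by omega, one_dvd m⟩
        · refine ⟨by omega, ?_⟩
          have : m - 1 + 1 = m := by omega
          rw [this]
    rw [hF, Finset.card_insert_of_notMem (by simp; omega), Finset.card_singleton]

-- B's loop characterisation
theorem pvTrial_iff (n : Int) : ∀ i : Int, 2 ≤ i →
    (pvTrial n i = true ↔ ∀ j : Int, i ≤ j → j * j ≤ n → ¬ j ∣ n) := by
  intro i0
  induction i0 using pvTrial.induct (n := n) with
  | case1 i h hm =>
    intro _
    rw [pvTrial, dif_pos h, if_pos hm]
    simp only [Bool.false_eq_true, false_iff, not_forall]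
    exact ⟨i, le_refl i, h, fun hc => hc ((PySem.Int.mod_eq_zero_iff_dvd n i).mp hm)⟩
  | case2 i h hm ih =>
    intro hi
    rw [pvTrial, dif_pos h, if_neg hm]
    rw [ih (by omega)]
    constructor
    · intro hall j hij hjj
      rcases eq_or_lt_of_le hij with rfl | hlt
      · intro hdvd
        exact hm ((PySem.Int.mod_eq_zero_iff_dvd n i).mpr hdvd)
      · exact hall j (by omega) hjj
    · intro hall j hij hjj
      exact hall j (by omega) hjj
  | case3 i h =>
    intro hi
    rw [pvTrial, dif_neg h]
    simp only [true_iff]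
    intro j hij hjj
    exact absurd (le_trans (by nlinarith) hjj) h

theorem pvEsPrimo_iff (n : Int) : pvEsPrimo n = true ↔ 1 ≤ n ∧ n.toNat.Prime := by
  unfold pvEsPrimo
  by_cases hn : n < 2
  · simp only [if_pos hn, Bool.false_eq_true, false_iff]
    rintro ⟨hn1, hp⟩
    have := hp.two_le
    omega
  · rw [if_neg hn, pvTrial_iff n 2 (le_refl 2)]
    have hn2 : 2 ≤ n := by omega
    have hm : n = ((n.toNat : ℕ) : Int) := by omega
    have hm2 : 2 ≤ n.toNat := by omega
    constructor
    · intro hall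
      refine ⟨by omega, Nat.prime_def_le_sqrt.mpr ⟨hm2, fun k hk2 hks => ?_⟩⟩
      have hkk : ((k : Int)) * ((k : Int)) ≤ n := by
        have h := Nat.le_sqrt.mp hks
        have h2 : ((k * k : ℕ) : Int) ≤ ((n.toNat : ℕ) : Int) := by exact_mod_cast h
        push_cast at h2
        rw [← hm] at h2
        exact h2
      intro hdvd
      exact hall (k : Int) (by exact_mod_cast hk2) hkk
        (by rw [hm]; exact_mod_cast hdvd)
    · rintro ⟨-, hp⟩ j hj2 hjj hdvd
      have hj : j = ((j.toNat : ℕ) : Int) := by omega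
      have hk2 : 2 ≤ j.toNat := by omega
      have hks : j.toNat ≤ n.toNat.sqrt := by
        apply Nat.le_sqrt.mpr
        have : ((j.toNat * j.toNat : ℕ) : Int) ≤ ((n.toNat : ℕ) : Int) := by
          push_cast
          rw [← hm]
          calc ((j.toNat : ℕ) : Int) * ((j.toNat : ℕ) : Int) = j * j := by rw [← hj]
            _ ≤ n := hjj
        exact_mod_cast this
      exact (Nat.prime_def_le_sqrt.mp hp).2 j.toNat hk2 hks
        (by rw [hm, hj, Int.natCast_dvd_natCast] at hdvd; exact hdvd)

-- the two per-element tests agree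
theorem pvCond_iff (n : Int) : pvDivCount n = 2 ↔ pvEsPrimo n = true := by
  by_cases hn : 1 ≤ n
  · rw [pvDivCount_eq n hn, pvEsPrimo_iff, pvCount_eq_card]
    have hiff : ((Finset.range n.toNat).filter
        (fun k => (decide ((k + 1 : ℕ) ∣ n.toNat)) = true)).card = 2 ↔ n.toNat.Prime := by
      simpa using pvCard_two_iff_prime n.toNat (by omega)
    constructor
    · intro h
      exact ⟨hn, hiff.mp (by exact_mod_cast h)⟩
    · rintro ⟨-, hp⟩
      exact_mod_cast hiff.mpr hp
  · constructor
    · intro h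
      exfalso
      unfold pvDivCount at h
      rw [show PySem.List.pyRange 1 (n + 1) 1 = [] from ?_] at h
      · simp at h
      · rw [PySem.List.pyRange_one]
        have : (n + 1 - 1).toNat = 0 := by omega
        rw [this]
        rfl
    · intro h
      rw [pvEsPrimo_iff] at h
      exact absurd h.1 hn

-- the set built by A's fold is B's set of the filtered list
theorem pvFold_set (xs : List Int) (p : Int → Bool) (s : PySem.Set Int) :
    xs.foldl (fun s x => if p x then PySem.Set.add s x else s) s
      = (xs.filter p).foldl PySem.Set.add s := by
  induction xs generalizing s with
  | nil => rfl
  | cons x xs ih => by_cases hx : p x = true <;> simp [hx, ih]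

-- ===== VERDICT (by name: the statement is the Claim_ definition above) =====
theorem imprimir_conjunto_numeros_primos_spec : Claim_equal_imprimir_conjunto_numeros_primos := by
  intro xs _
  show _ = _
  unfold imprimir_conjunto_numeros_primos imprimir_conjunto_numeros_primos_alt
  simp only [pvCond_iff]
  rw [show (fun (s : PySem.Set Int) numero => if pvEsPrimo numero = true then PySem.Set.add s numero else s)
        = (fun s numero => if pvEsPrimo numero then PySem.Set.add s numero else s) from rfl]
  rw [pvFold_set xs pvEsPrimo PySem.Set.empty]
  rfl
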